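-- pv_equiv track=rewrite | github.com/miliar/Code_Jam_Webscraper | solutions_python/Problem_97/671.py | rotacionesNumero
-- ===== SOURCE A (Python) =====
-- def rotacionesNumero(numero):
-- 	## Regresa todas las rotaciones del numero
-- 	original = numero
-- 	lista = []
-- 	for i in range(len(numero)-1):
-- 		lastDigit = numero[-1]
-- 		numero = lastDigit + numero[:-1]
-- 		if(numero[0] == "0" or (original == numero)):
-- 			continue
-- 		lista.append(numero)
-- 	return lista
-- ===== SOURCE B (Python) =====
-- def rotacionesNumero(numero):
--     # Doubled-string trick: every rotation of numero is an n-length window of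
--     # numero+numero.  Scan the window start left to right (rotation amount
--     # descending) and build the result BACK-TO-FRONT by prepending accepted
--     # windows, so the final list comes out in rotation-amount-ascending order.
--     n = len(numero)
--     doble = numero + numero
--     lista = []
--     for i in range(1, n):
--         rot = doble[i:i+n]
--         if rot[0] != "0" and rot != numero:
--             lista = [rot] + lista
--     return lista
-- ===== Notes on version B (the rewrite author's own statement) =====
-- stated objective: alternative
-- what changed: B uses the doubled-string trick (every rotation is an n-length window of numero+numero), scans window starts left to right (rotation amount descending) and builds the output back-to-front by prepending, instead of A's loop that rebuilds a mutable running string from the previous rotation and appends to an accumulator.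
import Mathlib
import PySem

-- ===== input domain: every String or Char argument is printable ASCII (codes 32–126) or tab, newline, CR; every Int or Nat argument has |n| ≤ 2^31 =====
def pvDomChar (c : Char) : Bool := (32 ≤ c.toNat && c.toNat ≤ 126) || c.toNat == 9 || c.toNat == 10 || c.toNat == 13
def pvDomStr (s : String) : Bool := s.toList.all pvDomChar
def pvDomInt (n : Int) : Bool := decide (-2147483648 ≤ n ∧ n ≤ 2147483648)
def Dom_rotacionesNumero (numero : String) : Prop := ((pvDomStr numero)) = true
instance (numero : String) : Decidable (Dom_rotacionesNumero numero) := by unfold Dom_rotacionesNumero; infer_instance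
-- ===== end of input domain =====

-- B replaces A's mutable rotate-and-carry loop by the doubled-string trick
-- (each rotation is an n-length window of numero+numero), scanning window
-- starts left to right and building the output back-to-front; objective: alternative.

-- ===== PORT A =====
-- A's loop body: numero = numero[-1] + numero[:-1]; skip if it starts with '0'
-- or equals the original, else append. State = (current string, lista).
def rotPasoA (original : List Char) (st : List Char × List (List Char)) (_ : Int) :
    List Char × List (List Char) :=
  match PySem.List.pyGet? st.1 (-1) with
  | none => st          -- unreachable: st.1 is nonempty whenever the loop runs
  | some lastDigit =>
    let nuevo := lastDigit :: PySem.List.slice st.1 none (some (-1))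
    (nuevo, if lastDigit = '0' ∨ nuevo = original then st.2 else st.2 ++ [nuevo])

def rotacionesNumero (numero : String) : List String :=
  let original := numero.toList
  let res := (PySem.List.pyRange 0 ((original.length : Int) - 1) 1).foldl
    (rotPasoA original) (original, ([] : List (List Char)))
  res.2.map String.ofList

-- ===== PORT B =====
-- B: doble = numero + numero; for i in range(1, n): rot = doble[i:i+n];
--    if rot[0] != "0" and rot != numero: lista = [rot] + lista
def rotacionesNumero_alt (numero : String) : List String :=
  let cs := numero.toList
  let n := cs.length
  let doble := cs ++ cs
  let lista := (PySem.List.pyRange 1 (n : Int) 1).foldl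
    (fun lista i =>
      let rot := PySem.List.slice doble (some i) (some (i + (n : Int)))
      if PySem.List.pyGet? rot 0 ≠ some '0' ∧ rot ≠ cs then [rot] ++ lista else lista)
    ([] : List (List Char))
  lista.map String.ofList

-- ===== PRECONDITION & SPEC =====
def Spec_rotacionesNumero (numero : String) (out : List String) : Prop := out = rotacionesNumero_alt numero
instance (numero : String) (out : List String) : Decidable (Spec_rotacionesNumero numero out) := by unfold Spec_rotacionesNumero; infer_instance

-- ===== CLAIM (what is proved, stated in full; the proofs are below) =====
def Claim_equal_rotacionesNumero : Prop := ∀ (numero : String), Dom_rotacionesNumero numero → Spec_rotacionesNumero numero (rotacionesNumero numero)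

-- ===== LEMMAS AND PROOFS =====

-- the k-th right-rotation of cs (0 ≤ k ≤ cs.length)
def rotk (cs : List Char) (k : Nat) : List Char :=
  cs.drop (cs.length - k) ++ cs.take (cs.length - k)

-- rotations j+1 … j+m of cs, filtered by the common guard, in order
def outs (cs : List Char) : Nat → Nat → List (List Char)
  | _, 0 => []
  | j, m+1 =>
    (if PySem.List.pyGet? (rotk cs (j+1)) 0 ≠ some '0' ∧ rotk cs (j+1) ≠ cs
      then [rotk cs (j+1)] else []) ++ outs cs (j+1) m

theorem rotk_zero (cs : List Char) : rotk cs 0 = cs := by simp [rotk]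

theorem rot_last (cs : List Char) (j : Nat) (hj : j < cs.length) :
    (rotk cs j).getLast? = some (cs[cs.length - j - 1]'(by omega)) := by
  have h1 : 1 ≤ cs.length - j := by omega
  have h2 : cs.length - j ≤ cs.length := by omega
  have hne : cs.take (cs.length - j) ≠ [] := by
    intro hnil; have := congrArg List.length hnil; simp at this; omega
  rw [rotk, List.getLast?_append_of_ne_nil _ hne, List.getLast?_eq_getElem?]
  simp [h2, Nat.sub_lt h1]

theorem rot_succ (cs : List Char) (j : Nat) (hj : j < cs.length) :
    cs[cs.length - j - 1]'(by omega) :: (rotk cs j).dropLast = rotk cs (j+1) := by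
  have h1 : 1 ≤ cs.length - j := by omega
  have h2 : cs.length - j ≤ cs.length := by omega
  have hne : cs.take (cs.length - j) ≠ [] := by
    intro hnil; have := congrArg List.length hnil; simp at this; omega
  rw [rotk, List.dropLast_append_of_ne_nil hne]
  have htake : (cs.take (cs.length - j)).dropLast = cs.take (cs.length - j - 1) := by
    simp [List.dropLast_eq_take, List.take_take]
  have hdrop : cs.drop (cs.length - j - 1) =
      cs[cs.length - j - 1]'(by omega) :: cs.drop (cs.length - j) := by
    rw [List.drop_eq_getElem_cons (by omega)]
    congr 2
    omega
  rw [htake, rotk]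
  have hidx : cs.length - (j+1) = cs.length - j - 1 := by omega
  rw [hidx, hdrop]
  rfl

theorem stepA_rot (cs : List Char) (j : Nat) (acc : List (List Char)) (x : Int)
    (hj : j < cs.length) :
    rotPasoA cs (rotk cs j, acc) x =
      (rotk cs (j+1),
        acc ++ (if PySem.List.pyGet? (rotk cs (j+1)) 0 ≠ some '0' ∧ rotk cs (j+1) ≠ cs
          then [rotk cs (j+1)] else [])) := by
  rw [rotPasoA]
  simp only [PySem.List.pyGet?_neg_one, rot_last cs j hj, PySem.List.slice_to_neg_one]
  simp only [← rot_succ cs j hj, PySem.List.pyGet?_zero_cons]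
  by_cases h1 : cs[cs.length - j - 1]'(by omega) = '0' <;>
    by_cases h2 : cs[cs.length - j - 1]'(by omega) :: (rotk cs j).dropLast = cs <;>
      simp [h1, h2]

theorem loopA (cs : List Char) (l : List Int) : ∀ (j : Nat) (acc : List (List Char)),
    j + l.length ≤ cs.length →
    l.foldl (rotPasoA cs) (rotk cs j, acc) = (rotk cs (j + l.length), acc ++ outs cs j l.length) := by
  induction l with
  | nil => intro j acc _; simp [outs]
  | cons x l ih =>
    intro j acc h
    simp only [List.foldl_cons, List.length_cons]
    rw [stepA_rot cs j acc x (by simp at h; omega)]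
    rw [ih (j+1) _ (by simp at h ⊢; omega)]
    have hidx : j + 1 + l.length = j + (l.length + 1) := by omega
    rw [hidx]
    simp [outs, List.append_assoc]

-- the window of the doubled string at start i is the (n-i)-th right-rotation
theorem window_rot (cs : List Char) (i : Nat) (hi : i ≤ cs.length) :
    ((cs ++ cs).drop i).take cs.length = rotk cs (cs.length - i) := by
  rw [List.drop_append_of_le_length hi, List.take_append]
  have hlen : (cs.drop i).length = cs.length - i := by simp
  rw [List.take_of_length_le (by omega), hlen, rotk]
  congr 2 <;> omega

theorem outs_snoc (cs : List Char) : ∀ (m j : Nat),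
    outs cs j (m+1) = outs cs j m ++
      (if PySem.List.pyGet? (rotk cs (j+m+1)) 0 ≠ some '0' ∧ rotk cs (j+m+1) ≠ cs
        then [rotk cs (j+m+1)] else []) := by
  intro m
  induction m with
  | zero => intro j; simp [outs]
  | succ m ih =>
    intro j
    conv_lhs => rw [outs]
    rw [ih (j+1)]
    have hidx : j + 1 + m + 1 = j + (m + 1) + 1 := by omega
    rw [hidx, outs, List.append_assoc]

theorem loopB (cs : List Char) : ∀ (m : Nat) (acc : List (List Char)), m ≤ cs.length →
    (PySem.List.pyRange (((cs.length - m : Nat) : Int)) ((cs.length : Nat) : Int) 1).foldl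
      (fun lista i =>
        let rot := PySem.List.slice (cs ++ cs) (some i) (some (i + (cs.length : Int)))
        if PySem.List.pyGet? rot 0 ≠ some '0' ∧ rot ≠ cs then [rot] ++ lista else lista)
      acc = outs cs 0 m ++ acc := by
  intro m
  induction m with
  | zero => intro acc _; simp [PySem.List.pyRange, outs]
  | succ m ih =>
    intro acc h
    rw [PySem.List.pyRange_one_cons (by push_cast; omega)]
    have hcast : ((cs.length - (m+1) : Nat) : Int) + 1 = ((cs.length - m : Nat) : Int) := by
      push_cast [Nat.le_of_succ_le h]; omega
    rw [List.foldl_cons, hcast]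
    simp only
    rw [PySem.List.slice_natCast_add, window_rot cs _ (by omega)]
    have hk : cs.length - (cs.length - (m+1)) = m + 1 := by omega
    rw [hk, ih _ (by omega)]
    rw [outs_snoc cs m 0]
    simp only [Nat.zero_add]
    by_cases hg : PySem.List.pyGet? (rotk cs (m+1)) 0 ≠ some '0' ∧ rotk cs (m+1) ≠ cs <;>
      simp [hg, List.append_assoc]

-- ===== VERDICT (by name: the statement is the Claim_ definition above) =====
theorem rotacionesNumero_spec : Claim_equal_rotacionesNumero := by
  intro numero _
  show rotacionesNumero numero = rotacionesNumero_alt numero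
  rw [rotacionesNumero, rotacionesNumero_alt]
  by_cases h0 : numero.toList = []
  · simp [h0, PySem.List.pyRange]
  · have hlen : 1 ≤ numero.toList.length := List.length_pos_of_ne_nil h0
    -- A side
    have ha : ((numero.toList.length : Int) - 1) = ((numero.toList.length - 1 : Nat) : Int) := by
      push_cast [hlen]; ring
    rw [ha, PySem.List.pyRange_zero_natCast]
    have hL : (List.map (fun k : Nat => (k : Int)) (List.range (numero.toList.length - 1))).length
        = numero.toList.length - 1 := by simp
    have hA := loopA numero.toList
      (List.map (fun k : Nat => (k : Int)) (List.range (numero.toList.length - 1))) 0 []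
      (by rw [hL]; omega)
    rw [rotk_zero, hL] at hA
    rw [hA]
    -- B side
    have hb : (1 : Int) = ((numero.toList.length - (numero.toList.length - 1) : Nat) : Int) := by
      omega
    have hB := loopB numero.toList (numero.toList.length - 1) [] (by omega)
    rw [← hb] at hB
    rw [hB]
    simp
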